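-- pv_equiv track=rewrite | github.com/lorenzoorsingher/exam_NLU | SA/part_1/functions.py | tag2ts
-- ===== SOURCE A (Python) =====
-- def tag2ts(ts_tag_sequence):
--     """
--     transform ts tag sequence to targeted sentiment
--     :param ts_tag_sequence: tag sequence for ts task
--     :return:
--     """
--     n_tags = len(ts_tag_sequence)
--     ts_sequence = []
--     beg, end = -1, -1
--     sentiment = None
--
--     for i in range(n_tags):
--         ts_tag = ts_tag_sequence[i]
--         if ts_tag == "T":
--             if beg == -1:
--                 beg = i
--             end = i
--             sentiment = "T"
--         else:
--             if beg != -1 and end != -1: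
--                 ts_sequence.append((beg, end, sentiment))
--                 beg, end, sentiment = -1, -1, None
--
--     if beg != -1 and end != -1:
--         ts_sequence.append((beg, end, sentiment))
--
--     return ts_sequence
-- ===== SOURCE B (Python) =====
-- def tag2ts(ts_tag_sequence):
--     """
--     transform ts tag sequence to targeted sentiment
--     :param ts_tag_sequence: tag sequence for ts task
--     :return:
--     """
--     res = []
--     i, n = 0, len(ts_tag_sequence)
--     while i < n:
--         j = i + 1
--         while j < n and ts_tag_sequence[j] == ts_tag_sequence[i]:
--             j += 1
--         if ts_tag_sequence[i] == "T":
--             res.append((i, j - 1, "T"))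
--         i = j
--     return res
-- ===== Notes on version B (the rewrite author's own statement) =====
-- stated objective: simpler
-- what changed: Replaces A's element-by-element beg/end/sentiment state machine with a trailing flush by a run-oriented two-pointer scan that finds each maximal run of equal tags at once and emits a span per T-run, needing no carried state or final-flush block.
import Mathlib
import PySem

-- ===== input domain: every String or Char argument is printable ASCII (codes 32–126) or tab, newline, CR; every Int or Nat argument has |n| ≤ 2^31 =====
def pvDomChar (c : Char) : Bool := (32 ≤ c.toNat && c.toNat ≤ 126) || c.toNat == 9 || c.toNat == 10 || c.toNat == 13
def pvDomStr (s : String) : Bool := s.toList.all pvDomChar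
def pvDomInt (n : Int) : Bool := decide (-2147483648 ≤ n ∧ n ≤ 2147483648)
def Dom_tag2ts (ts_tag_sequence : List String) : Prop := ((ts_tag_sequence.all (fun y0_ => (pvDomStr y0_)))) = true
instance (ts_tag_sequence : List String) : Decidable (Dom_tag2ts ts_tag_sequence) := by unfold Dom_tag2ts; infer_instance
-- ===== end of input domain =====

-- B replaces A's per-element beg/end/sentiment state machine (with trailing flush) by a
-- run-oriented two-pointer scan emitting one span per maximal run of "T" tags (objective: simpler).

-- ===== PORT A =====
-- A's for-loop as structural recursion over the list, carrying index i and the loop state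
-- beg/end/sentiment/acc.  Python's `sentiment = None` is rendered as "" : every append A
-- actually reaches has sentiment = "T" (beg ≠ -1 implies the last tag seen was "T").
def tag2tsGoA : List String → Int → Int → Int → String → List (Int × Int × String) → List (Int × Int × String)
  | [], _, beg, e, sent, acc => if beg ≠ -1 ∧ e ≠ -1 then acc ++ [(beg, e, sent)] else acc
  | t :: rest, i, beg, e, sent, acc =>
    if t = "T" then tag2tsGoA rest (i+1) (if beg = -1 then i else beg) i "T" acc
    else if beg ≠ -1 ∧ e ≠ -1 then tag2tsGoA rest (i+1) (-1) (-1) "" (acc ++ [(beg, e, sent)])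
    else tag2tsGoA rest (i+1) beg e sent acc

def tag2ts (ts_tag_sequence : List String) : List (Int × Int × String) :=
  tag2tsGoA ts_tag_sequence 0 (-1) (-1) "" []

-- ===== PORT B =====
-- B's outer while loop; the inner while (advance j over the maximal run equal to element i)
-- is the takeWhile/dropWhile split of the rest of the list.
def tag2tsGoB (i : Int) : List String → List (Int × Int × String)
  | [] => []
  | x :: rest =>
    let run := rest.takeWhile (fun s => s == x)
    let d := rest.dropWhile (fun s => s == x)
    let j : Int := i + 1 + run.length
    if x = "T" then (i, j - 1, "T") :: tag2tsGoB j d else tag2tsGoB j d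
termination_by xs => xs.length
decreasing_by
  all_goals exact Nat.lt_succ_of_le (List.length_dropWhile_le (fun s => s == x) rest)

def tag2ts_alt (ts_tag_sequence : List String) : List (Int × Int × String) :=
  tag2tsGoB 0 ts_tag_sequence

-- ===== PRECONDITION & SPEC =====
def Spec_tag2ts (ts_tag_sequence : List String) (out : List (Int × Int × String)) : Prop := out = tag2ts_alt ts_tag_sequence
instance (ts_tag_sequence : List String) (out : List (Int × Int × String)) : Decidable (Spec_tag2ts ts_tag_sequence out) := by unfold Spec_tag2ts; infer_instance

-- ===== CLAIM (what is proved, stated in full; the proofs are below) =====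
def Claim_equal_tag2ts : Prop := ∀ (ts_tag_sequence : List String), Dom_tag2ts ts_tag_sequence → Spec_tag2ts ts_tag_sequence (tag2ts ts_tag_sequence)

-- ===== LEMMAS AND PROOFS =====

-- skipping one non-"T" element in B advances the index by one
lemma goB_skip_nonT (x : String) (hx : x ≠ "T") (i : Int) (xs : List String) :
    tag2tsGoB i (x :: xs) = tag2tsGoB (i+1) xs := by
  cases xs with
  | nil => simp [tag2tsGoB, hx]
  | cons y ys =>
    by_cases hy : y = x
    · subst hy
      rw [tag2tsGoB, tag2tsGoB]
      simp only [List.takeWhile, List.dropWhile, BEq.rfl, if_neg hx]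
      have : (i + 1 + ((1 : Nat) + (ys.takeWhile (fun s => s == y)).length : Nat))
          = (i + 1 + 1 + ((ys.takeWhile (fun s => s == y)).length : Nat)) := by push_cast; ring
      simp only [List.length_cons]
      rw [show ((ys.takeWhile (fun s => s == y)).length + 1 : Nat) = (1 + (ys.takeWhile (fun s => s == y)).length : Nat) by omega]
      rw [this]
    · rw [tag2tsGoB]
      have hby : (y == x) = false := by simp [hy]
      simp [List.takeWhile, List.dropWhile, hby, hx]

-- A inside a "T"-run: state (beg = b, end = i-1, sentiment = "T") flushes exactly after the run
lemma goA_in_run (xs : List String) : ∀ (i b e : Int) (acc : List (Int × Int × String)),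
    0 ≤ b → 1 ≤ i → e = i - 1 →
    tag2tsGoA xs i b e "T" acc =
      (match xs.dropWhile (fun s => s == "T") with
       | [] => acc ++ [(b, i - 1 + ((xs.takeWhile (fun s => s == "T")).length : Int), "T")]
       | _ :: d' => tag2tsGoA d' (i + ((xs.takeWhile (fun s => s == "T")).length : Int) + 1) (-1) (-1) ""
            (acc ++ [(b, i - 1 + ((xs.takeWhile (fun s => s == "T")).length : Int), "T")])) := by
  induction xs with
  | nil =>
    intro i b e acc hb hi he
    subst he
    simp [tag2tsGoA]
    constructor <;> omega
  | cons y ys ih =>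
    intro i b e acc hb hi he
    by_cases hy : y = "T"
    · subst hy
      rw [tag2tsGoA, if_pos rfl, if_neg (show ¬ (b = -1) by omega)]
      rw [ih (i+1) b i acc hb (by omega) (by ring)]
      simp only [List.takeWhile_cons, List.dropWhile_cons, beq_self_eq_true, if_true,
        List.length_cons]
      have h2 : (i + 1) - 1 + ((ys.takeWhile (fun s => s == "T")).length : Int)
          = i - 1 + (((ys.takeWhile (fun s => s == "T")).length + 1 : Nat) : Int) := by push_cast; ring
      have h3 : (i + 1) + ((ys.takeWhile (fun s => s == "T")).length : Int) + 1
          = i + (((ys.takeWhile (fun s => s == "T")).length + 1 : Nat) : Int) + 1 := by push_cast; ring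
      rw [h2, h3]
    · subst he
      rw [tag2tsGoA, if_neg hy, if_pos (show b ≠ -1 ∧ i - 1 ≠ -1 from ⟨by omega, by omega⟩)]
      have hby : (y == "T") = false := by simp [hy]
      simp [hby]

lemma dropWhile_head_not {p : String → Bool} {xs : List String} {y : String} {d' : List String}
    (h : xs.dropWhile p = y :: d') : p y = false := by
  have := List.head?_dropWhile_not p xs
  rw [h] at this
  simpa using this

-- main invariant: A in fresh state = B
lemma goA_fresh : ∀ (n : Nat) (xs : List String), xs.length ≤ n → ∀ (i : Int) (acc : List (Int × Int × String)),
    0 ≤ i → tag2tsGoA xs i (-1) (-1) "" acc = acc ++ tag2tsGoB i xs := by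
  intro n
  induction n with
  | zero =>
    intro xs hlen i acc hi
    have : xs = [] := by cases xs <;> simp_all
    subst this
    simp [tag2tsGoA, tag2tsGoB]
  | succ n ih =>
    intro xs hlen i acc hi
    cases xs with
    | nil => simp [tag2tsGoA, tag2tsGoB]
    | cons x rest =>
      by_cases hx : x = "T"
      · subst hx
        rw [tag2tsGoA, if_pos rfl, if_pos (rfl : (-1 : Int) = -1)]
        rw [goA_in_run rest (i+1) i i acc hi (by omega) (by ring)]
        rw [tag2tsGoB]
        cases hd : rest.dropWhile (fun s => s == "T") with
        | nil =>
          simp [tag2tsGoB]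
          omega
        | cons y d' =>
          have hy : y ≠ "T" := by
            have := dropWhile_head_not hd
            simpa using this
          have hd'len : d'.length ≤ n := by
            have h2 := List.length_dropWhile_le (fun s => s == "T") rest
            rw [hd] at h2
            simp at h2 hlen
            omega
          dsimp only
          simp only [if_true]
          rw [goB_skip_nonT y hy]
          have hnn : (0:Int) ≤ i + 1 + ((rest.takeWhile (fun s => s == "T")).length : Int) + 1 := by
            have := Int.natCast_nonneg ((rest.takeWhile (fun s => s == "T")).length)
            omega
          rw [ih d' hd'len (i + 1 + ((rest.takeWhile (fun s => s == "T")).length : Int) + 1) _ hnn]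
          have e1 : (i + 1) - 1 + ((rest.takeWhile (fun s => s == "T")).length : Int)
              = i + 1 + ((rest.takeWhile (fun s => s == "T")).length : Int) - 1 := by ring
          rw [e1]
          simp [List.append_assoc]
      · rw [tag2tsGoA, if_neg hx,
            if_neg (show ¬ ((-1 : Int) ≠ -1 ∧ (-1 : Int) ≠ -1) by simp)]
        rw [ih rest (by simpa using Nat.le_of_succ_le_succ hlen) (i+1) acc (by omega)]
        rw [goB_skip_nonT x hx]

-- ===== VERDICT (by name: the statement is the Claim_ definition above) =====
theorem tag2ts_spec : Claim_equal_tag2ts := by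
  intro xs _
  unfold Spec_tag2ts tag2ts tag2ts_alt
  simpa using goA_fresh xs.length xs le_rfl 0 [] le_rfl
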